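-- pv_equiv track=rewrite | github.com/pcaball71927/Proyecto2Programacion20191 | adn.py | obtener_secciones
-- ===== SOURCE A (Python) =====
-- def obtener_secciones(adn, n):
--     """
--     (str, num) -> list of str
--
--     >>> obtener_secciones('AATCGAATCC',5)
--     ['AA', 'TC', 'GA', 'AT', 'CC']
--     >>> obtener_secciones('ATTGCTAAC',3)
--     ['ATT', 'GCT', 'AAC']
--     >>> obtener_secciones('GAGATCTCAGT',2)
--     ['GAGAT', 'CTCAGT']
--
--     obtiene secciones de una cadena conforme con la catidad requerida
--
--     :param adn:cadena de adn
--     :param n: numero de secciones que desea la cadena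
--     :return:cadena de adn en secciones
--     """
--     longitud_cadena_grupos=len(adn)//n
--     resultado_seccion = []
--     for grupo in range(n):
--         resultado_grupo = ""
--         for caracter in range(longitud_cadena_grupos):
--             indice_caracter_adn = grupo * longitud_cadena_grupos + caracter
--             resultado_grupo = resultado_grupo + adn[indice_caracter_adn]
--         resultado_seccion.append(resultado_grupo)
--     if n*longitud_cadena_grupos < len(adn):
--         inicio_residuo = n*longitud_cadena_grupos
--         fin_residuo = len(adn)
--         ultimo_grupo = n-1
--         for indice in range(inicio_residuo, fin_residuo):
--             resultado_seccion[ultimo_grupo] = resultado_seccion[ultimo_grupo] + adn[indice]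
--     return resultado_seccion
-- ===== SOURCE B (Python) =====
-- def obtener_secciones(adn, n):
--     g = len(adn) // n
--     bounds = [i * g for i in range(n)] + [len(adn)]
--     return [adn[a:b] for a, b in zip(bounds, bounds[1:])]
-- ===== Notes on version B (the rewrite author's own statement) =====
-- stated objective: simpler
-- what changed: A builds each section character-by-character with nested index loops and then patches the remainder onto the last section with a separate loop; B computes the cut-point boundaries once and slices the string between consecutive boundaries, the remainder being absorbed by making the final boundary len(adn).
import Mathlib
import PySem

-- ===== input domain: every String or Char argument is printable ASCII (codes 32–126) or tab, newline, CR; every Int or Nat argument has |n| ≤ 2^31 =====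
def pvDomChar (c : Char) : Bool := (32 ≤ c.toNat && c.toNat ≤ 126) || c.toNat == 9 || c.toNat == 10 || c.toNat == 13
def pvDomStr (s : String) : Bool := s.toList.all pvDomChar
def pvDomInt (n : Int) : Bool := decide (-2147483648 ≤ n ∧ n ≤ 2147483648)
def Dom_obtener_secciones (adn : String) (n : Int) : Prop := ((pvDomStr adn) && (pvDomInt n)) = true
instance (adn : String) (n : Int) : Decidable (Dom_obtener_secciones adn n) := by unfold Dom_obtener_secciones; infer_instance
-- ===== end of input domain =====

-- B replaces A's nested character-copy loops and separate remainder loop by cut-point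
-- boundaries and one slice per section (objective: simpler).

-- ===== PORT A =====
def obtener_secciones (adn : String) (n : Int) : List String :=
  let cs : List Char := adn.toList
  let longitud : Int := PySem.Int.floordiv (cs.length : Int) n
  let resultado : List (List Char) :=
    (PySem.List.pyRange 0 n).foldl
      (fun acc grupo =>
        acc ++ [(PySem.List.pyRange 0 longitud).foldl
          (fun s c => s ++ [PySem.List.pyGetD cs (grupo * longitud + c) ' ']) []]) []
  let resultado2 : List (List Char) :=
    if n * longitud < (cs.length : Int) then
      (PySem.List.pyRange (n * longitud) (cs.length : Int)).foldl
        (fun r i => PySem.List.pySetD r (n - 1)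
          (PySem.List.pyGetD r (n - 1) [] ++ [PySem.List.pyGetD cs i ' '])) resultado
    else resultado
  resultado2.map (fun l => String.ofList l)

-- ===== PORT B =====
def obtener_secciones_alt (adn : String) (n : Int) : List String :=
  let cs : List Char := adn.toList
  let g : Int := PySem.Int.floordiv (cs.length : Int) n
  let bounds : List Int := (PySem.List.pyRange 0 n).map (fun i => i * g) ++ [(cs.length : Int)]
  (bounds.zip (bounds.drop 1)).map
    (fun ab => String.ofList (PySem.List.slice cs (some ab.1) (some ab.2)))

-- ===== PRECONDITION & SPEC =====
-- Pre_ excludes exactly n = 0, where Python's len(adn)//n raises ZeroDivisionError (in both A and B).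
def Pre_obtener_secciones (adn : String) (n : Int) : Prop := n ≠ 0
instance (adn : String) (n : Int) : Decidable (Pre_obtener_secciones adn n) := by unfold Pre_obtener_secciones; infer_instance
def pvWitness_obtener_secciones : String × Int := ("AATCGAATCC", 5)
def Spec_obtener_secciones (adn : String) (n : Int) (out : List String) : Prop := out = obtener_secciones_alt adn n
instance (adn : String) (n : Int) (out : List String) : Decidable (Spec_obtener_secciones adn n out) := by unfold Spec_obtener_secciones; infer_instance

-- ===== CLAIM (what is proved, stated in full; the proofs are below) =====
def Claim_equal_obtener_secciones : Prop := ∀ (adn : String) (n : Int), Dom_obtener_secciones adn n → Pre_obtener_secciones adn n → Spec_obtener_secciones adn n (obtener_secciones adn n)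

-- ===== LEMMAS AND PROOFS =====

lemma pvPyRange_nil {a b : Int} (h : b ≤ a) : PySem.List.pyRange a b = [] := by
  simp [PySem.List.pyRange, h]

-- A's inner loop: copying characters a .. a+k-1 of cs one by one is take k of drop a.
lemma pvMapChars (cs : List Char) (a : Nat) :
    ∀ k : Nat, a + k ≤ cs.length →
    (PySem.List.pyRange 0 (k : Int)).map (fun c => PySem.List.pyGetD cs ((a : Int) + c) ' ')
      = (cs.drop a).take k := by
  intro k
  induction k with
  | zero => intro _; simp [pvPyRange_nil]
  | succ k ih =>
    intro h
    have hk : a + k < cs.length := by omega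
    rw [show (((k + 1 : Nat)) : Int) = (k : Int) + 1 by push_cast; ring,
        PySem.List.pyRange_one_succ_right (by positivity), List.map_append, ih (by omega)]
    have hget : PySem.List.pyGetD cs ((a : Int) + (k : Int)) ' ' = cs[a + k] := by
      rw [show ((a : Int) + (k : Int)) = (((a + k : Nat)) : Int) by push_cast; ring,
          PySem.List.pyGetD_natCast]
      exact List.getD_eq_getElem _ _ hk
    simp only [List.map_cons, List.map_nil, hget]
    rw [List.take_succ]
    simp [List.getElem?_drop, List.getElem?_eq_getElem hk]

-- A's remainder loop: appending one character at a time to section n-1.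
lemma pvResidFold (cs : List Char) (N' : Nat) :
    ∀ (l : List Int) (r : List (List Char)), r.length = N' + 1 →
    l.foldl (fun r i => PySem.List.pySetD r (((N' + 1 : Nat) : Int) - 1)
        (PySem.List.pyGetD r (((N' + 1 : Nat) : Int) - 1) [] ++ [PySem.List.pyGetD cs i ' '])) r
      = r.set N' (r.getD N' [] ++ l.map (fun i => PySem.List.pyGetD cs i ' ')) := by
  have hc : (((N' + 1 : Nat)) : Int) - 1 = ((N' : Nat) : Int) := by push_cast; ring
  simp only [hc, PySem.List.pySetD_natCast, PySem.List.pyGetD_natCast]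
  intro l
  induction l with
  | nil =>
      intro r hr
      simp only [List.foldl_nil, List.map_nil, List.append_nil]
      rw [List.getD_eq_getElem _ _ (by omega)]
      exact (List.set_getElem_self (by omega)).symm
  | cons x l ih =>
      intro r hr
      simp only [List.foldl_cons, List.map_cons]
      rw [ih _ (by simp [hr])]
      rw [List.getD_eq_getElem (r.set N' _) _ (by simp; omega), List.getElem_set_self, List.set_set]
      rw [List.getD_eq_getElem _ _ (by omega)]
      simp [List.getD_eq_getElem _ _ (by omega : N' < r.length)]


lemma pvSetLastAppend {α : Type} (xs : List α) (n : Nat) (h : xs.length = n) (a v : α) :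
    (xs ++ [a]).set n v = xs ++ [v] := by
  subst h
  induction xs with
  | nil => simp
  | cons x t ih => simp [ih]

-- B's zip-of-boundaries comprehension, in closed form.
lemma pvBside (cs : List Char) (N' g' : Nat) :
    (((((List.range (N' + 1)).map (fun k : Nat => (k : Int) * (g' : Int))) ++ [(cs.length : Int)]).zip
        ((((List.range (N' + 1)).map (fun k : Nat => (k : Int) * (g' : Int))) ++ [(cs.length : Int)]).drop 1)).map
      (fun ab => PySem.List.slice cs (some ab.1) (some ab.2)))
    = ((List.range N').map (fun i => (cs.drop (i * g')).take g')) ++ [cs.drop (N' * g')] := by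
  apply List.ext_getElem
  · simp only [List.length_map, List.length_zip, List.length_drop, List.length_append,
      List.length_range, List.length_cons, List.length_nil]
    omega
  · intro i hi1 hi2
    have hi : i < N' + 1 := by simpa using hi1
    simp only [List.getElem_map, List.getElem_zip, List.getElem_drop, List.getElem_append,
      List.length_map, List.length_range]
    by_cases hlt : i < N'
    · rw [dif_pos (show i < N' + 1 by omega), dif_pos (show 1 + i < N' + 1 by omega),
          dif_pos hlt]
      simp only [List.getElem_map, List.getElem_range]
      rw [show (i : Int) * (g' : Int) = ((i * g' : Nat) : Int) by push_cast; ring,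
          show ((1 + i : Nat) : Int) * (g' : Int) = (((1 + i) * g' : Nat) : Int) by push_cast; ring,
          PySem.List.slice_natCast]
      congr 1
      rw [Nat.add_mul]
      omega
    · have hiN : i = N' := by omega
      subst hiN
      rw [dif_pos (show i < i + 1 by omega), dif_neg (show ¬ 1 + i < i + 1 by omega),
          dif_neg (show ¬ i < i by omega)]
      simp only [List.getElem_map, List.getElem_range, List.getElem_singleton]
      rw [show (i : Int) * (g' : Int) = ((i * g' : Nat) : Int) by push_cast; ring,
          PySem.List.slice_natCast]
      exact List.take_of_length_le (by simp)

-- ===== VERDICT (by name: the statement is the Claim_ definition above) =====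
theorem obtener_secciones_spec : Claim_equal_obtener_secciones := by
  intro adn n _ hpre
  unfold Spec_obtener_secciones
  simp only [obtener_secciones, obtener_secciones_alt]
  generalize adn.toList = cs
  rcases lt_trichotomy n 0 with hneg | hz | hpos
  · -- n < 0 : both loops are empty and A's remainder branch is never taken
    have hr : PySem.List.pyRange 0 n = [] := pvPyRange_nil (le_of_lt hneg)
    have hb : ¬ (n * PySem.Int.floordiv (cs.length : Int) n < (cs.length : Int)) := by
      intro hlt
      have h1 := (PySem.Int.mod_neg_bounds (cs.length : Int) hneg).2
      have h2 := PySem.Int.floordiv_mul_add_mod (cs.length : Int) n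
      rw [mul_comm] at hlt
      linarith
    simp [hr, hb]
  · exact absurd hz hpre
  · -- n > 0
    obtain ⟨N, rfl⟩ : ∃ N : Nat, n = (N : Int) :=
      ⟨n.toNat, (Int.toNat_of_nonneg (le_of_lt hpos)).symm⟩
    have hN : 0 < N := by exact_mod_cast hpos
    obtain ⟨N', rfl⟩ : ∃ N', N = N' + 1 := ⟨N - 1, by omega⟩
    set g' := cs.length / (N' + 1) with hg'
    have hg : PySem.Int.floordiv ((cs.length : Nat) : Int) ((N' + 1 : Nat) : Int) = ((g' : Nat) : Int) :=
      PySem.Int.floordiv_natCast cs.length (N' + 1)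
    have hgm : (N' + 1) * g' ≤ cs.length := by
      have h := Nat.div_mul_le_self cs.length (N' + 1)
      calc (N' + 1) * g' = g' * (N' + 1) := Nat.mul_comm _ _
        _ ≤ cs.length := h
    rw [hg]
    -- A's groups loop in closed form
    have hres : (PySem.List.pyRange 0 ((N' + 1 : Nat) : Int)).foldl
        (fun acc grupo =>
          acc ++ [(PySem.List.pyRange 0 ((g' : Nat) : Int)).foldl
            (fun s c => s ++ [PySem.List.pyGetD cs (grupo * ((g' : Nat) : Int) + c) ' ']) []]) []
        = (List.range (N' + 1)).map (fun i => (cs.drop (i * g')).take g') := by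
      rw [PySem.List.foldl_append_singleton_eq_map, List.nil_append,
          PySem.List.pyRange_zero_natCast (N' + 1), List.map_map]
      refine List.map_congr_left ?_
      intro i hi
      have hi' : i < N' + 1 := List.mem_range.mp hi
      simp only [Function.comp]
      rw [PySem.List.foldl_append_singleton_eq_map, List.nil_append]
      rw [show (i : Int) * ((g' : Nat) : Int) = ((i * g' : Nat) : Int) by push_cast; ring]
      refine pvMapChars cs (i * g') g' ?_
      have h1 : i * g' + g' = (i + 1) * g' := by ring
      have h2 : (i + 1) * g' ≤ (N' + 1) * g' := Nat.mul_le_mul_right _ (by omega)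
      omega
    rw [hres]
    -- B's list in closed form
    rw [PySem.List.pyRange_zero_natCast, List.map_map]
    have hcomp : ((fun i => i * ((g' : Nat) : Int)) ∘ fun k : Nat => (k : Int))
        = fun k : Nat => (k : Int) * (g' : Int) := by
      funext k; simp [Function.comp]
    rw [hcomp]
    have hmapmap : ((((List.range (N' + 1)).map (fun k : Nat => (k : Int) * (g' : Int))) ++ [(cs.length : Int)]).zip
          ((((List.range (N' + 1)).map (fun k : Nat => (k : Int) * (g' : Int))) ++ [(cs.length : Int)]).drop 1)).map
        (fun ab => String.ofList (PySem.List.slice cs (some ab.1) (some ab.2)))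
        = (((((List.range (N' + 1)).map (fun k : Nat => (k : Int) * (g' : Int))) ++ [(cs.length : Int)]).zip
          ((((List.range (N' + 1)).map (fun k : Nat => (k : Int) * (g' : Int))) ++ [(cs.length : Int)]).drop 1)).map
          (fun ab => PySem.List.slice cs (some ab.1) (some ab.2))).map (fun l => String.ofList l) := by
      rw [List.map_map]
      rfl
    rw [hmapmap, pvBside cs N' g']
    -- it remains to see that A's list (after the remainder branch) is B's closed form
    refine congrArg (List.map (fun l => String.ofList l)) ?_
    by_cases hcond : ((N' + 1 : Nat) : Int) * ((g' : Nat) : Int) < ((cs.length : Nat) : Int)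
    · rw [if_pos hcond]
      rw [pvResidFold cs N']
      · rw [show ((N' + 1 : Nat) : Int) * ((g' : Nat) : Int) = (((N' + 1) * g' : Nat) : Int) by
            push_cast; ring]
        rw [PySem.List.map_pyGetD_pyRange' cs ' ' (by positivity)]
        rw [List.getD_eq_getElem _ _ (by simp)]
        simp only [List.getElem_map, List.getElem_range, Int.toNat_natCast]
        have hcomb : (cs.drop (N' * g')).take g' ++ cs.drop ((N' + 1) * g') = cs.drop (N' * g') := by
          have h1 : (N' + 1) * g' = N' * g' + g' := by ring
          rw [h1, ← List.drop_drop, List.take_append_drop]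
        rw [hcomb]
        rw [List.range_succ, List.map_append]
        simp only [List.map_cons, List.map_nil]
        exact pvSetLastAppend _ N' (by simp) _ _
      · simp
    · rw [if_neg hcond]
      have hEq : (N' + 1) * g' = cs.length := by
        have : ¬ ((N' + 1) * g' < cs.length) := by
          intro h
          exact hcond (by exact_mod_cast h)
        omega
      rw [List.range_succ, List.map_append]
      simp only [List.map_cons, List.map_nil]
      have hG : (cs.drop (N' * g')).take g' = cs.drop (N' * g') := by
        apply List.take_of_length_le
        rw [List.length_drop, ← hEq, show (N' + 1) * g' = N' * g' + g' from by ring,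
            Nat.add_sub_cancel_left]
      rw [hG]
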